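-- pv_equiv track=rewrite | github.com/verton1337/pyqt | lesson1/task3.py | magic_action_for_data
-- ===== SOURCE A (Python) =====
-- def magic_action_for_data(data:tuple):
--     """
--     Функция заполняет недостающие данные пустыми строками
--     """
--     result = []
--     #Находим более длинный список и берем количество строк
--     rows = len(data[0]) if len(data[0]) > len(data[1]) else len(data[1])
--     #Создаем кортежи с данными
--     for i in range(rows):
--         try:
--             left_col = data[0][i]
--         except IndexError:
--             left_col = ''
--         try:
--             right_col = data[1][i]
--         except IndexError:
--             right_col = ''
--         result.append((left_col, right_col))
--     return result
-- ===== SOURCE B (Python) =====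
-- def magic_action_for_data(data: tuple):
--     """Pad both columns to equal length with empty strings, then zip them."""
--     rows = max(len(data[0]), len(data[1]))
--     left = list(data[0]) + [''] * (rows - len(data[0]))
--     right = list(data[1]) + [''] * (rows - len(data[1]))
--     return list(zip(left, right))
-- ===== Notes on version B (the rewrite author's own statement) =====
-- stated objective: idiomatic
-- what changed: Replaces the per-index loop with try/except IndexError by explicit padding of both columns to equal length followed by a single zip.
import Mathlib
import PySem

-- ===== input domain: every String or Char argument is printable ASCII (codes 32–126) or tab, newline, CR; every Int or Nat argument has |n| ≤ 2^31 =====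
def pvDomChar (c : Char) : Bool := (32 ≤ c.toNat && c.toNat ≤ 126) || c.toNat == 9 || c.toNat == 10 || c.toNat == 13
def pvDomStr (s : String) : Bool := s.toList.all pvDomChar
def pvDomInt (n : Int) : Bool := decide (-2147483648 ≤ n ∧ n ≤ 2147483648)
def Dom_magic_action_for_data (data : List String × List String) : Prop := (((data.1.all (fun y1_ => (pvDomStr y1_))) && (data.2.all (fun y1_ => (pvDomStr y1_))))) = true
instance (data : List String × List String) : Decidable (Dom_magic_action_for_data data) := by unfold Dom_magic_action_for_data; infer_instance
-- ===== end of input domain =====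

-- B pads both columns to equal length and zips them instead of A's per-index try/except loop; objective: idiomatic.
-- ===== PORT A =====
def magic_action_for_data (data : List String × List String) : List (String × String) :=
  let rows : Int := if data.1.length > data.2.length then data.1.length else data.2.length
  (PySem.List.pyRange 0 rows 1).foldl (fun result i =>
    let left_col := (PySem.List.pyGet? data.1 i).getD ""      -- try data[0][i] except IndexError: ''
    let right_col := (PySem.List.pyGet? data.2 i).getD ""
    result ++ [(left_col, right_col)]) []

-- ===== PORT B =====
def magic_action_for_data_alt (data : List String × List String) : List (String × String) :=
  let rows := max data.1.length data.2.length
  let left := data.1 ++ List.replicate (rows - data.1.length) ""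
  let right := data.2 ++ List.replicate (rows - data.2.length) ""
  left.zip right

-- ===== PRECONDITION & SPEC =====
def Spec_magic_action_for_data (data : List String × List String) (out : List (String × String)) : Prop := out = magic_action_for_data_alt data
instance (data : List String × List String) (out : List (String × String)) : Decidable (Spec_magic_action_for_data data out) := by unfold Spec_magic_action_for_data; infer_instance

-- ===== CLAIM (what is proved, stated in full; the proofs are below) =====
def Claim_equal_magic_action_for_data : Prop := ∀ (data : List String × List String), Dom_magic_action_for_data data → Spec_magic_action_for_data data (magic_action_for_data data)

-- ===== LEMMAS AND PROOFS =====

-- ===== VERDICT (by name: the statement is the Claim_ definition above) =====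
theorem pad_getElem (l : List String) (n i : Nat) (hl : l.length ≤ n) (hi : i < n) :
    (l ++ List.replicate (n - l.length) "")[i]'(by simp; omega) = (PySem.List.pyGet? l (i : Int)).getD "" := by
  rw [PySem.List.pyGet?_natCast]
  by_cases h : i < l.length
  · rw [List.getElem_append_left h]
    simp [List.getElem?_eq_getElem h]
  · rw [List.getElem_append_right (by omega)]
    simp [List.getElem?_eq_none (by omega : l.length ≤ i)]

theorem foldl_map_form (rows : Nat) (f : Int → String × String) :
    (PySem.List.pyRange 0 rows 1).foldl (fun result i => result ++ [f i]) [] =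
      (List.range rows).map (fun i : Nat => f (i : Int)) := by
  rw [PySem.List.foldl_append_singleton_eq_map, PySem.List.pyRange_zero_natCast, List.map_map]
  rfl

theorem magic_action_for_data_spec : Claim_equal_magic_action_for_data := by
  intro data _
  unfold Spec_magic_action_for_data magic_action_for_data magic_action_for_data_alt
  set l := data.1
  set r := data.2
  have hrows : (if l.length > r.length then (l.length : Int) else (r.length : Int))
      = ((max l.length r.length : Nat) : Int) := by
    split_ifs with h <;> simp <;> omega
  rw [hrows, foldl_map_form]
  apply List.ext_getElem
  · simp
  · intro i h1 h2
    have hi : i < max l.length r.length := by simpa using h1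
    rw [List.getElem_map, List.getElem_range, List.getElem_zip]
    rw [pad_getElem l _ i (le_max_left _ _) hi, pad_getElem r _ i (le_max_right _ _) hi]
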